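-- pv_equiv track=rewrite | github.com/chetandahal80/Sudoku-solver---Backtracking-CPA-Dancing-Link | sudoku_solver_dlx.py | cover_cell
-- ===== SOURCE A (Python) =====
-- def cover_cell(N, n_row, n_col, num):
--     row = []
--     for i in range(4*N*N):
--         if ((i == n_row*N + n_col) or (i == N*N + n_row*N + num - 1) or (i == 2*N*N + n_col*N + num - 1) or (i == 3*N*N + (n_row//3 * 3 + n_col//3)*N + num - 1)):
--             row.append(1)
--         else:
--             row.append(0)
--     return row
-- ===== SOURCE B (Python) =====
-- def cover_cell(N, n_row, n_col, num):
--     L = 4 * N * N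
--     cs = {n_row * N + n_col,
--           N * N + n_row * N + num - 1,
--           2 * N * N + n_col * N + num - 1,
--           3 * N * N + (n_row // 3 * 3 + n_col // 3) * N + num - 1}
--     row = []
--     prev = 0
--     for c in sorted(c for c in cs if 0 <= c < L):
--         row.extend([0] * (c - prev))
--         row.append(1)
--         prev = c + 1
--     row.extend([0] * (L - prev))
--     return row
-- ===== Notes on version B (the rewrite author's own statement) =====
-- stated objective: alternative
-- what changed: Instead of scanning all 4*N*N indices and testing each against the four constraint columns, B computes the four column indices directly, sorts the in-range ones, and assembles the row from zero-runs with a 1 at each computed position.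
import Mathlib
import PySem

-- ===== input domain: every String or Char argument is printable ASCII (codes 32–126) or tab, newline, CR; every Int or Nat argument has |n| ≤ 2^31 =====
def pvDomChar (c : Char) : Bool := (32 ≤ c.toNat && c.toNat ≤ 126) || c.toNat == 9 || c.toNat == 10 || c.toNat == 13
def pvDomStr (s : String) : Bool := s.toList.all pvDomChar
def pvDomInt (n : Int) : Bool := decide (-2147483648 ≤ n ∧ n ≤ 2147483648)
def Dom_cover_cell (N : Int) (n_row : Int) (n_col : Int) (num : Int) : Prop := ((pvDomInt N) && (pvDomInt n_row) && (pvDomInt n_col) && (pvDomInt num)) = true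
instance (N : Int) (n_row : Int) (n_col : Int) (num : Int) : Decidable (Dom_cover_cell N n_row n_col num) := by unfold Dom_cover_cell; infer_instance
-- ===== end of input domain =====

-- B builds the exact-cover row from the four computed constraint-column indices
-- (zero-runs with a 1 at each in-range index) instead of A's test-every-index scan.

-- ===== PORT A =====
def cover_cell (N : Int) (n_row : Int) (n_col : Int) (num : Int) : List Int :=
  (PySem.List.pyRange 0 (4*N*N) 1).foldl
    (fun row i =>
      if i = n_row*N + n_col ∨ i = N*N + n_row*N + num - 1 ∨
         i = 2*N*N + n_col*N + num - 1 ∨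
         i = 3*N*N + (PySem.Int.floordiv n_row 3 * 3 + PySem.Int.floordiv n_col 3)*N + num - 1
      then row ++ [1] else row ++ [0]) []

-- ===== PORT B =====
-- helper: the loop 'for c in sorted(...): row += [0]*(c-prev) + [1]; prev = c+1' plus the final tail of zeros
def coverBuild (L : Int) (prev : Int) : List Int → List Int
  | [] => List.replicate (L - prev).toNat 0
  | c :: rest => List.replicate (c - prev).toNat 0 ++ [1] ++ coverBuild L (c+1) rest

def cover_cell_alt (N : Int) (n_row : Int) (n_col : Int) (num : Int) : List Int :=
  let L := 4*N*N
  let cs := PySem.Set.ofList [n_row*N + n_col, N*N + n_row*N + num - 1,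
              2*N*N + n_col*N + num - 1,
              3*N*N + (PySem.Int.floordiv n_row 3 * 3 + PySem.Int.floordiv n_col 3)*N + num - 1]
  coverBuild L 0 (PySem.List.sorted (cs.filter (fun c => decide (0 ≤ c ∧ c < L))) (fun x => x) false)

-- ===== PRECONDITION & SPEC =====
def Spec_cover_cell (N : Int) (n_row : Int) (n_col : Int) (num : Int) (out : List Int) : Prop := out = cover_cell_alt N n_row n_col num
instance (N : Int) (n_row : Int) (n_col : Int) (num : Int) (out : List Int) : Decidable (Spec_cover_cell N n_row n_col num out) := by unfold Spec_cover_cell; infer_instance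

-- ===== CLAIM (what is proved, stated in full; the proofs are below) =====
def Claim_equal_cover_cell : Prop := ∀ (N : Int) (n_row : Int) (n_col : Int) (num : Int), Dom_cover_cell N n_row n_col num → Spec_cover_cell N n_row n_col num (cover_cell N n_row n_col num)

-- ===== LEMMAS AND PROOFS =====

-- A's loop is a map over the index range
theorem coverA_eq_map (N n_row n_col num : Int) :
    cover_cell N n_row n_col num =
      (PySem.List.pyRange 0 (4*N*N) 1).map
        (fun i => if i = n_row*N + n_col ∨ i = N*N + n_row*N + num - 1 ∨
                     i = 2*N*N + n_col*N + num - 1 ∨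
                     i = 3*N*N + (PySem.Int.floordiv n_row 3 * 3 + PySem.Int.floordiv n_col 3)*N + num - 1
                  then (1:Int) else 0) := by
  unfold cover_cell
  rw [show (fun (row : List Int) (i : Int) =>
      if i = n_row*N + n_col ∨ i = N*N + n_row*N + num - 1 ∨
         i = 2*N*N + n_col*N + num - 1 ∨
         i = 3*N*N + (PySem.Int.floordiv n_row 3 * 3 + PySem.Int.floordiv n_col 3)*N + num - 1
      then row ++ [1] else row ++ [0]) =
      (fun (row : List Int) (i : Int) => row ++ [if i = n_row*N + n_col ∨ i = N*N + n_row*N + num - 1 ∨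
         i = 2*N*N + n_col*N + num - 1 ∨
         i = 3*N*N + (PySem.Int.floordiv n_row 3 * 3 + PySem.Int.floordiv n_col 3)*N + num - 1
         then (1:Int) else 0]) from by
    funext row i; split <;> rfl]
  rw [PySem.List.foldl_append_singleton_eq_map]
  simp

-- B's segment builder is the indicator map of its (strictly increasing, in-window) index list
theorem coverBuild_eq_map (L : Int) (cs : List Int) :
    ∀ (prev : Int), cs.Pairwise (· < ·) → (∀ c ∈ cs, prev ≤ c ∧ c < L) →
    coverBuild L prev cs =
      (PySem.List.pyRange prev L 1).map (fun i => if i ∈ cs then (1:Int) else 0) := by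
  induction cs with
  | nil =>
    intro prev _ _
    simp [coverBuild, List.map_const', PySem.List.length_pyRange_one]
  | cons c rest ih =>
    intro prev hpw hmem
    obtain ⟨hc1, hc2⟩ := hmem c (by simp)
    have hrest_gt : ∀ c' ∈ rest, c < c' := fun c' h => (List.pairwise_cons.1 hpw).1 c' h
    rw [PySem.List.pyRange_one_append prev c L hc1 (le_of_lt hc2),
        PySem.List.pyRange_one_cons hc2]
    rw [List.map_append]
    have h1 : (PySem.List.pyRange prev c 1).map
        (fun i => if i ∈ c :: rest then (1:Int) else 0) =
        List.replicate (c - prev).toNat 0 := by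
      rw [List.map_congr_left (g := fun _ => (0:Int)) ?_]
      · simp [List.map_const', PySem.List.length_pyRange_one]
      · intro i hi
        have hilt : i < c := (PySem.List.mem_pyRange_one.1 hi).2
        have : i ∉ c :: rest := by
          simp only [List.mem_cons, not_or]
          exact ⟨by omega, fun h => absurd (hrest_gt i h) (by omega)⟩
        simp [this]
    have h2 : (PySem.List.pyRange (c+1) L 1).map
        (fun i => if i ∈ c :: rest then (1:Int) else 0) =
        coverBuild L (c+1) rest := by
      rw [ih (c+1) (List.pairwise_cons.1 hpw).2
          (fun c' h => ⟨by have := hrest_gt c' h; omega, (hmem c' (by simp [h])).2⟩)]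
      apply List.map_congr_left
      intro i hi
      have : c + 1 ≤ i := (PySem.List.mem_pyRange_one.1 hi).1
      simp only [List.mem_cons]
      have hne : ¬ i = c := by omega
      simp [hne]
    rw [h1, List.map_cons, h2]
    simp [coverBuild]

theorem cover_cell_spec' (N n_row n_col num : Int) :
    cover_cell N n_row n_col num = cover_cell_alt N n_row n_col num := by
  unfold cover_cell_alt
  set L := 4*N*N with hL
  set raw := [n_row*N + n_col, N*N + n_row*N + num - 1,
              2*N*N + n_col*N + num - 1,
              3*N*N + (PySem.Int.floordiv n_row 3 * 3 + PySem.Int.floordiv n_col 3)*N + num - 1] with hraw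
  set cs := PySem.List.sorted ((PySem.Set.ofList raw).filter (fun c => decide (0 ≤ c ∧ c < L))) (fun x => x) false with hcs
  have hmem_cs : ∀ i, i ∈ cs ↔ i ∈ raw ∧ 0 ≤ i ∧ i < L := by
    intro i
    rw [hcs, PySem.List.mem_sorted, List.mem_filter]
    simp [PySem.Set.mem_ofList]
  have hpw : cs.Pairwise (· < ·) := by
    have hle : cs.Pairwise (fun a b => (fun x : Int => x) a ≤ (fun x : Int => x) b) :=
      PySem.List.sorted_pairwise ((PySem.Set.ofList raw).filter (fun c => decide (0 ≤ c ∧ c < L))) (fun x : Int => x)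
    have hnd : cs.Nodup := by
      refine (PySem.List.sorted_perm ((PySem.Set.ofList raw).filter (fun c => decide (0 ≤ c ∧ c < L))) (fun x : Int => x) false).symm.nodup ?_
      exact (PySem.Set.nodup_ofList raw).filter _
    exact (hle.and hnd).imp (fun h => lt_of_le_of_ne h.1 h.2)
  rw [coverBuild_eq_map L cs 0 hpw (fun c h => by
        have := (hmem_cs c).1 h; exact ⟨this.2.1, this.2.2⟩)]
  rw [coverA_eq_map]
  apply List.map_congr_left
  intro i hi
  have hib := PySem.List.mem_pyRange_one.1 hi
  have : (i ∈ cs) ↔ (i ∈ raw) := by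
    rw [hmem_cs i]
    exact ⟨fun h => h.1, fun h => ⟨h, hib.1, hib.2⟩⟩
  simp only [hraw, List.mem_cons, List.not_mem_nil, or_false] at this
  exact if_congr this.symm rfl rfl

-- ===== VERDICT (by name: the statement is the Claim_ definition above) =====
theorem cover_cell_spec : Claim_equal_cover_cell := by
  intro N n_row n_col num _
  exact cover_cell_spec' N n_row n_col num
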